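-- pv_equiv track=rewrite | github.com/UlrichBerntien/Codewars-Katas | 6_kyu/Popping_Blocks.py | pop_blocks
-- ===== SOURCE A (Python) =====
-- def pop_blocks(lst: list) -> list:
--     """
--     Returns the list lst without consecutive repeated elements.
--     """
--     # work on a copy, keep original list unchanged
--     result = list(lst)
--     i = 0
--     while i < len(result)-1:
--         if result[i] == result[i+1]:
--             # Remove all duplicates
--             while i+1 < len(result) and result[i+1] == result[i]:
--                 del result[i+1]
--             # remove also the origianl
--             del result[i]
--             if i > 0: i -= 1
--         else:
--             i += 1
--     return result
-- ===== SOURCE B (Python) =====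
-- def pop_blocks(lst: list) -> list:
--     """
--     Returns the list lst without consecutive repeated elements.
--     Single pass with a stack of [value, count]; a run of length >= 2 is
--     dropped when it ends, merging its neighbours.
--     """
--     stack = []  # entries [value, count]; only the top entry can have count >= 2
--     for x in lst:
--         if stack and stack[-1][0] == x:
--             stack[-1][1] += 1
--         else:
--             if stack and stack[-1][1] >= 2:
--                 stack.pop()
--             if stack and stack[-1][0] == x:
--                 stack[-1][1] += 1
--             else:
--                 stack.append([x, 1])
--     if stack and stack[-1][1] >= 2:
--         stack.pop()
--     out = []
--     for v, c in stack:
--         out.extend([v] * c)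
--     return out
-- ===== Notes on version B (the rewrite author's own statement) =====
-- stated objective: alternative
-- what changed: Replaced A's in-place delete-and-backtrack while loop (repeated del on the list with the index stepping back after each collapse) by a single left-to-right pass maintaining a stack of (value, count) runs that drops a run of length >= 2 when it ends and re-merges its neighbours.
import Mathlib
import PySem

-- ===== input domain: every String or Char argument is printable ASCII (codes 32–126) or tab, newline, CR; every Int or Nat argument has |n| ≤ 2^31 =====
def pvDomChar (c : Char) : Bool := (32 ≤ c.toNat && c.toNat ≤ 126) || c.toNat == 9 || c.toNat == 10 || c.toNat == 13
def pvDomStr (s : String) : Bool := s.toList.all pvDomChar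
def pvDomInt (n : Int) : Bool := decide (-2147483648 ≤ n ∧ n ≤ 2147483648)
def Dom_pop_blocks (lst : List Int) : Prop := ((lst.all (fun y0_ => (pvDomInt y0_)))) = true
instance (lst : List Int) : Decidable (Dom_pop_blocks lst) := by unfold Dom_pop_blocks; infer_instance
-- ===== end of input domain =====

-- B replaces A's in-place delete-and-backtrack while loop by a single left-to-right
-- pass with a stack of (value, count) runs; return values are proved equal on every input.

-- ===== PORT A =====
-- inner while loop: `while i+1 < len(result) and result[i+1] == result[i]: del result[i+1]`
theorem pv_dec_erase (l : List Int) (i : Nat) (h : i + 1 < l.length) :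
    (l.eraseIdx (i + 1)).length < l.length := by
  simp [List.length_eraseIdx, h]; omega

-- inner while loop: `while i+1 < len(result) and result[i+1] == result[i]: del result[i+1]`
-- (both reads are in range whenever they happen, so total getD lookups are exact here)
def delRun (result : List Int) (i : Nat) : List Int :=
  if h : i + 1 < result.length then
    if result.getD (i+1) 0 = result.getD i 0 then
      delRun (result.eraseIdx (i+1)) i
    else result
  else result
termination_by result.length
decreasing_by exact pv_dec_erase result i h

theorem delRun_length_le (l : List Int) (i : Nat) : (delRun l i).length ≤ l.length := by
  rw [delRun]
  split
  · split
    · calc (delRun (l.eraseIdx (i+1)) i).length ≤ (l.eraseIdx (i+1)).length :=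
          delRun_length_le (l.eraseIdx (i+1)) i
      _ ≤ l.length := Nat.le_of_lt (pv_dec_erase l i (by assumption))
    · exact le_refl _
  · exact le_refl _
termination_by l.length
decreasing_by exact pv_dec_erase l i (by assumption)

theorem delRun_length_lt (l : List Int) (i : Nat) (h : i + 1 < l.length)
    (he : l.getD (i+1) 0 = l.getD i 0) : (delRun l i).length < l.length := by
  rw [delRun, dif_pos h, if_pos he]
  calc (delRun (l.eraseIdx (i+1)) i).length ≤ (l.eraseIdx (i+1)).length := delRun_length_le _ _
  _ < l.length := pv_dec_erase l i h

theorem pv_arith_main (L D E i j : Nat) (hiL : i + 1 < L) (hDL : D < L) (hED : E ≤ D)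
    (hlo : i - 1 ≤ j) (hhi : j ≤ i) : 2 * E - j < 2 * L - i := by omega

theorem pv_arith_adv (L i : Nat) (h : i + 1 < L) : 2 * L - (i + 1) < 2 * L - i := by omega

theorem pv_dec_loopA (result : List Int) (i : Nat) (h : i + 1 < result.length)
    (he : result.getD i 0 = result.getD (i+1) 0) :
    2 * ((delRun result i).eraseIdx i).length - (if 0 < i then i - 1 else i)
      < 2 * result.length - i := by
  refine pv_arith_main result.length (delRun result i).length
    ((delRun result i).eraseIdx i).length i (if 0 < i then i - 1 else i) h
    (delRun_length_lt result i h he.symm) ?_ ?_ ?_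
  · exact List.length_eraseIdx_le _ _
  · split <;> omega
  · split <;> omega

-- outer while loop of A
def loopA (result : List Int) (i : Nat) : List Int :=
  if h : i + 1 < result.length then
    if result.getD i 0 = result.getD (i+1) 0 then
      loopA ((delRun result i).eraseIdx i) (if 0 < i then i - 1 else i)
    else loopA result (i+1)
  else result
termination_by 2 * result.length - i
decreasing_by
  · exact pv_dec_loopA result i h (by assumption)
  · exact pv_arith_adv result.length i h

def pop_blocks (lst : List Int) : List Int := loopA lst 0

-- ===== PORT B =====
-- drop the top run if its length is >= 2 (`if stack and stack[-1][1] >= 2: stack.pop()`)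
def popBig (stack : List (Int × Nat)) : List (Int × Nat) :=
  match stack with
  | (v, c) :: rest => if 2 ≤ c then rest else (v, c) :: rest
  | [] => []

-- merge x into the top run if it matches, else push a new run
def bumpOrPush (stack : List (Int × Nat)) (x : Int) : List (Int × Nat) :=
  match stack with
  | (u, d) :: rest => if u = x then (u, d + 1) :: rest else (x, 1) :: (u, d) :: rest
  | [] => [(x, 1)]

-- body of B's `for x in lst` loop (stack head = Python's stack[-1])
def stepB (stack : List (Int × Nat)) (x : Int) : List (Int × Nat) :=
  match stack with
  | (v, c) :: rest => if v = x then (v, c + 1) :: rest else bumpOrPush (popBig ((v, c) :: rest)) x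
  | [] => bumpOrPush [] x

-- B's final output loop: `for v, c in stack: out.extend([v] * c)`
def expandB (stack : List (Int × Nat)) : List Int :=
  stack.reverse.flatMap (fun p => List.replicate p.2 p.1)

def pop_blocks_alt (lst : List Int) : List Int :=
  expandB (popBig (lst.foldl stepB []))

-- ===== PRECONDITION & SPEC =====
def Spec_pop_blocks (lst : List Int) (out : List Int) : Prop := out = pop_blocks_alt lst
instance (lst : List Int) (out : List Int) : Decidable (Spec_pop_blocks lst out) := by unfold Spec_pop_blocks; infer_instance

-- ===== CLAIM (what is proved, stated in full; the proofs are below) =====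
def Claim_equal_pop_blocks : Prop := ∀ (lst : List Int), Dom_pop_blocks lst → Spec_pop_blocks lst (pop_blocks lst)

-- ===== LEMMAS AND PROOFS =====

-- erasing the element right after a prefix
theorem eraseIdx_append_len (P : List Int) (v : Int) (t : List Int) :
    (P ++ v :: t).eraseIdx P.length = P ++ t := by
  induction P with
  | nil => simp
  | cons a P ih => simpa using ih

theorem getD_append_len (P : List Int) (v : Int) (t : List Int) :
    (P ++ v :: t).getD P.length 0 = v := by
  induction P with
  | nil => rfl
  | cons a P ih => simp

theorem getD_append_len_succ (P : List Int) (q y : Int) (t : List Int) :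
    (P ++ q :: y :: t).getD (P.length + 1) 0 = y := by
  have := getD_append_len (P ++ [q]) y t
  simp only [List.append_assoc, List.cons_append, List.nil_append, List.length_append,
    List.length_cons, List.length_nil, Nat.zero_add] at this
  exact this

-- A's inner while loop deletes exactly the leading copies of v after position P.length
theorem delRun_spec (P : List Int) (v : Int) (t : List Int) :
    delRun (P ++ v :: t) P.length = P ++ v :: t.dropWhile (· == v) := by
  induction t with
  | nil => rw [delRun, dif_neg (by simp)]; simp
  | cons w t2 ih =>
    rw [delRun, dif_pos (by simp)]
    rw [getD_append_len_succ P v w t2, getD_append_len P v (w :: t2)]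
    by_cases hwv : w = v
    · rw [if_pos hwv]
      rw [show (P ++ v :: w :: t2).eraseIdx (P.length + 1) = P ++ v :: t2 by
            have := eraseIdx_append_len (P ++ [v]) w t2
            simpa using this]
      rw [ih, List.dropWhile_cons]
      simp [hwv]
    · rw [if_neg hwv, List.dropWhile_cons]
      simp [hwv]

-- the outer loop terminates when i points at the last element
theorem loopA_last (Q : List Int) : loopA Q (Q.length - 1) = Q := by
  rw [loopA, dif_neg (by omega)]

-- one advancing step of the outer loop
theorem loopA_advance (P : List Int) (q y : Int) (t : List Int) (h : q ≠ y) :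
    loopA (P ++ q :: y :: t) P.length = loopA (P ++ q :: y :: t) (P.length + 1) := by
  rw [loopA, dif_pos (by simp)]
  rw [if_neg]
  rw [getD_append_len P q (y :: t), getD_append_len_succ P q y t]
  exact h

-- one deleting step of the outer loop: the whole run of v vanishes and i backs up
theorem loopA_delete (P : List Int) (v : Int) (t : List Int) :
    loopA (P ++ v :: v :: t) P.length = loopA (P ++ t.dropWhile (· == v)) (P.length - 1) := by
  rw [loopA, dif_pos (by simp)]
  rw [if_pos]
  · rw [show delRun (P ++ v :: v :: t) P.length = P ++ v :: List.dropWhile (· == v) t by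
          have := delRun_spec P v (v :: t)
          simpa using this]
    rw [eraseIdx_append_len]
    rw [show (if 0 < P.length then P.length - 1 else P.length) = P.length - 1 by
          split <;> omega]
  · rw [getD_append_len P v (v :: t), getD_append_len_succ P v v t]

-- stack invariant of B's loop: counts positive, adjacent values distinct,
-- every count below the top equals 1
def InvS : List (Int × Nat) → Prop
  | [] => True
  | [(_, c)] => 1 ≤ c
  | (v, c) :: (u, d) :: rest => 1 ≤ c ∧ v ≠ u ∧ d = 1 ∧ InvS ((u, d) :: rest)

theorem InvS_one_le {v : Int} {c : Nat} {rest : List (Int × Nat)}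
    (h : InvS ((v, c) :: rest)) : 1 ≤ c := by
  match rest with
  | [] => exact h
  | (u, d) :: r2 => exact h.1

theorem InvS_tail {v : Int} {c : Nat} {rest : List (Int × Nat)}
    (h : InvS ((v, c) :: rest)) : InvS rest := by
  match rest with
  | [] => trivial
  | (u, d) :: r2 => exact h.2.2.2

theorem InvS_bump {v : Int} {c : Nat} {rest : List (Int × Nat)}
    (h : InvS ((v, c) :: rest)) : InvS ((v, c + 1) :: rest) := by
  match rest with
  | [] => simp [InvS]
  | (u, d) :: r2 => exact ⟨by omega, h.2.1, h.2.2.1, h.2.2.2⟩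

theorem expandB_cons (v : Int) (c : Nat) (rest : List (Int × Nat)) :
    expandB ((v, c) :: rest) = expandB rest ++ List.replicate c v := by
  simp [expandB]

-- the part of the unread suffix that A has already consumed eagerly
def adjSuf (stack : List (Int × Nat)) (suf : List Int) : List Int :=
  match stack with
  | (v, c) :: _ => if 2 ≤ c then suf.dropWhile (· == v) else suf
  | [] => suf

theorem popBig_big {v : Int} {c : Nat} {r : List (Int × Nat)} (h : 2 ≤ c) :
    popBig ((v, c) :: r) = r := by simp [popBig, h]

theorem popBig_small {v : Int} {c : Nat} {r : List (Int × Nat)} (h : ¬ 2 ≤ c) :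
    popBig ((v, c) :: r) = (v, c) :: r := by simp [popBig, h]

theorem adjSuf_big {v : Int} {c : Nat} {r : List (Int × Nat)} {suf : List Int} (h : 2 ≤ c) :
    adjSuf ((v, c) :: r) suf = suf.dropWhile (· == v) := by simp [adjSuf, h]

theorem adjSuf_small {v : Int} {c : Nat} {r : List (Int × Nat)} {suf : List Int} (h : ¬ 2 ≤ c) :
    adjSuf ((v, c) :: r) suf = suf := by simp [adjSuf, h]

theorem stepB_eq {v : Int} {c : Nat} {r : List (Int × Nat)} {y : Int} (h : v = y) :
    stepB ((v, c) :: r) y = (v, c + 1) :: r := by simp [stepB, h]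

theorem stepB_ne {v : Int} {c : Nat} {r : List (Int × Nat)} {y : Int} (h : ¬ v = y) :
    stepB ((v, c) :: r) y = bumpOrPush (popBig ((v, c) :: r)) y := by simp [stepB, h]

-- simulation: A's loop, started from the state abstracting B's stack, computes
-- what B computes on the remaining suffix
theorem sim (suf : List Int) : ∀ stack : List (Int × Nat), InvS stack →
    loopA (expandB (popBig stack) ++ adjSuf stack suf) ((expandB (popBig stack)).length - 1)
      = expandB (popBig (List.foldl stepB stack suf)) := by
  induction suf with
  | nil =>
    intro stack hInv
    have ha : adjSuf stack [] = [] := by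
      match stack with
      | [] => rfl
      | (v, c) :: r => simp [adjSuf]
    rw [ha, List.append_nil, loopA_last, List.foldl_nil]
  | cons y t ih =>
    intro stack hInv
    match stack with
    | [] =>
      have h2 := ih [(y, 1)] (by simp [InvS])
      rw [popBig_small (by omega), adjSuf_small (by omega), expandB_cons] at h2
      simp only [List.foldl_cons]
      show loopA (expandB (popBig []) ++ (y :: t)) ((expandB (popBig [])).length - 1)
          = expandB (popBig (List.foldl stepB (stepB [] y) t))
      have hstep : stepB [] y = [(y, 1)] := rfl
      have he : expandB (popBig []) = [] := rfl
      rw [hstep, he, ← h2]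
      simp [expandB]
    | (v, c) :: rest =>
      rw [List.foldl_cons]
      by_cases hvy : v = y
      · subst hvy
        rw [stepB_eq rfl]
        by_cases hc : 2 ≤ c
        · -- absorb y into the big top run; A's state does not move
          have h2 := ih ((v, c + 1) :: rest) (InvS_bump hInv)
          rw [popBig_big (show 2 ≤ c + 1 by omega), adjSuf_big (show 2 ≤ c + 1 by omega)] at h2
          rw [popBig_big hc, adjSuf_big hc]
          rw [show List.dropWhile (· == v) (v :: t) = List.dropWhile (· == v) t by
            simp]
          exact h2
        · -- top run has count 1: it becomes a pair and A deletes the whole run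
          have hc1 : c = 1 := by have := InvS_one_le hInv; omega
          subst hc1
          rw [popBig_small hc, adjSuf_small hc, expandB_cons]
          have h2 := ih ((v, 2) :: rest) (InvS_bump hInv)
          rw [popBig_big (by omega), adjSuf_big (by omega)] at h2
          rw [show (expandB rest ++ List.replicate 1 v) ++ (v :: t)
                = expandB rest ++ v :: v :: t by simp,
              show (expandB rest ++ List.replicate 1 v).length - 1 = (expandB rest).length by
                simp,
              loopA_delete]
          exact h2
      · rw [stepB_ne hvy]
        by_cases hc : 2 ≤ c
        · rw [popBig_big hc, adjSuf_big hc]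
          rw [show List.dropWhile (· == v) (y :: t) = y :: t by
            simp [Ne.symm hvy]]
          match rest, hInv with
          | [], _ =>
            have h2 := ih [(y, 1)] (by simp [InvS])
            rw [popBig_small (by omega), adjSuf_small (by omega), expandB_cons] at h2
            show loopA (expandB [] ++ (y :: t)) ((expandB []).length - 1)
                = expandB (popBig (List.foldl stepB (bumpOrPush [] y) t))
            have hb : bumpOrPush [] y = [(y, 1)] := rfl
            rw [hb, ← h2]
            simp [expandB]
          | (u, d) :: r2, hInv =>
            have hd : d = 1 := hInv.2.2.1
            subst hd
            have htl : InvS ((u, 1) :: r2) := InvS_tail hInv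
            by_cases huy : u = y
            · subst huy
              rw [show bumpOrPush ((u, 1) :: r2) u = (u, 2) :: r2 by simp [bumpOrPush]]
              have h2 := ih ((u, 2) :: r2) (InvS_bump htl)
              rw [popBig_big (by omega), adjSuf_big (by omega)] at h2
              rw [expandB_cons,
                  show (expandB r2 ++ List.replicate 1 u) ++ (u :: t)
                    = expandB r2 ++ u :: u :: t by simp,
                  show (expandB r2 ++ List.replicate 1 u).length - 1 = (expandB r2).length by
                    simp,
                  loopA_delete]
              exact h2
            · rw [show bumpOrPush ((u, 1) :: r2) y = (y, 1) :: (u, 1) :: r2 by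
                simp [bumpOrPush, huy]]
              have hinv2 : InvS ((y, 1) :: (u, 1) :: r2) :=
                ⟨le_refl 1, Ne.symm huy, rfl, htl⟩
              have h2 := ih ((y, 1) :: (u, 1) :: r2) hinv2
              rw [popBig_small (by omega), adjSuf_small (by omega), expandB_cons,
                  expandB_cons] at h2
              rw [expandB_cons,
                  show (expandB r2 ++ List.replicate 1 u) ++ (y :: t)
                    = expandB r2 ++ u :: y :: t by simp,
                  show (expandB r2 ++ List.replicate 1 u).length - 1 = (expandB r2).length by
                    simp,
                  loopA_advance _ _ _ _ huy]
              rw [show ((expandB r2 ++ List.replicate 1 u) ++ List.replicate 1 y) ++ t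
                    = expandB r2 ++ u :: y :: t by simp,
                  show ((expandB r2 ++ List.replicate 1 u) ++ List.replicate 1 y).length - 1
                    = (expandB r2).length + 1 by simp] at h2
              exact h2
        · have hc1 : c = 1 := by have := InvS_one_le hInv; omega
          subst hc1
          rw [popBig_small hc, adjSuf_small hc]
          rw [show bumpOrPush ((v, 1) :: rest) y = (y, 1) :: (v, 1) :: rest by
            simp [bumpOrPush, hvy]]
          have hinv2 : InvS ((y, 1) :: (v, 1) :: rest) := ⟨le_refl 1, Ne.symm hvy, rfl, hInv⟩
          have h2 := ih ((y, 1) :: (v, 1) :: rest) hinv2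
          rw [popBig_small (by omega), adjSuf_small (by omega), expandB_cons,
              expandB_cons] at h2
          rw [expandB_cons,
              show (expandB rest ++ List.replicate 1 v) ++ (y :: t)
                = expandB rest ++ v :: y :: t by simp,
              show (expandB rest ++ List.replicate 1 v).length - 1 = (expandB rest).length by
                simp,
              loopA_advance _ _ _ _ hvy]
          rw [show ((expandB rest ++ List.replicate 1 v) ++ List.replicate 1 y) ++ t
                = expandB rest ++ v :: y :: t by simp,
              show ((expandB rest ++ List.replicate 1 v) ++ List.replicate 1 y).length - 1
                = (expandB rest).length + 1 by simp] at h2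
          exact h2

-- ===== VERDICT (by name: the statement is the Claim_ definition above) =====
theorem pop_blocks_spec : Claim_equal_pop_blocks := by
  intro lst _
  show pop_blocks lst = pop_blocks_alt lst
  have h := sim lst [] trivial
  have he : expandB (popBig ([] : List (Int × Nat))) = [] := rfl
  rw [he, List.nil_append] at h
  simpa [pop_blocks, pop_blocks_alt, adjSuf] using h
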